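-- pv_equiv track=rewrite | github.com/soulkenHRy/Guitar_tabs-generator | api/tab.py | format_tab
-- ===== SOURCE A (Python) =====
-- TAB_WIDTH = 60  # Characters per line
--
-- STRING_NAMES = ['e', 'B', 'G', 'D', 'A', 'E']  # High to low
--
-- def format_tab(notes, measures_per_line=4):
--     """
--     Format a list of notes into guitar tablature text.
--
--     Args:
--         notes: List of dicts with 'string' (1-6) and 'fret' (0-24) keys
--         measures_per_line: How many measures per tab line
--
--     Returns:
--         Formatted tab string
--     """
--     if not notes:
--         return "No notes to display."
--
--     # Initialize strings (6 strings)
--     strings = {i: '' for i in range(1, 7)}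
--
--     # Track position for alignment
--     for note in notes:
--         string_num = note.get('string', 1)
--         fret_num = note.get('fret', 0)
--
--         if string_num < 1 or string_num > 6:
--             continue
--
--         fret_str = str(fret_num)
--         pad_len = len(fret_str)
--
--         # Add the note to the correct string, dashes to others
--         for s in range(1, 7):
--             if s == string_num:
--                 strings[s] += fret_str + '-'
--             else:
--                 strings[s] += '-' * pad_len + '-'
--
--     # Add trailing dashes to make all strings equal length
--     max_len = max(len(s) for s in strings.values())
--     for s in range(1, 7):
--         strings[s] = strings[s].ljust(max_len, '-')
--
--     # Split into lines of TAB_WIDTH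
--     result_lines = []
--     pos = 0
--
--     while pos < max_len:
--         end = min(pos + TAB_WIDTH, max_len)
--
--         for i, name in enumerate(STRING_NAMES):
--             string_num = i + 1  # 1=high E, 6=low E ... but convention is:
--             # STRING_NAMES[0] = 'e' = string 1 (high E)
--             line = f"{name}|{strings[string_num][pos:end]}|"
--             result_lines.append(line)
--
--         result_lines.append('')  # Blank line between sections
--         pos = end
--
--     return '\n'.join(result_lines)
-- ===== SOURCE B (Python) =====
-- TAB_WIDTH = 60  # Characters per line
--
-- STRING_NAMES = ['e', 'B', 'G', 'D', 'A', 'E']  # High to low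
--
-- def format_tab(notes, measures_per_line=4):
--     if not notes:
--         return "No notes to display."
--     # Single pass: record each accepted note as a sparse placement
--     # (string, column offset, fret text) while accumulating the total width.
--     placements = []
--     width = 0
--     for note in notes:
--         s = note.get('string', 1)
--         if 1 <= s <= 6:
--             f = str(note.get('fret', 0))
--             placements.append((s, width, f))
--             width += len(f) + 1
--     # Each row is rebuilt from its own sparse events by gap-filling with dashes;
--     # no per-note emission into six accumulators, and no ljust pass is needed.
--     rows = []
--     for k in range(1, 7):
--         events = [(off, f) for s, off, f in placements if s == k]
--         parts = []
--         cur = 0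
--         for off, f in events:
--             parts.append('-' * (off - cur))
--             parts.append(f)
--             cur = off + len(f)
--         rows.append(''.join(parts) + '-' * (width - cur))
--     lines = []
--     for pos in range(0, width, TAB_WIDTH):
--         for name, row in zip(STRING_NAMES, rows):
--             lines.append(f"{name}|{row[pos:pos + TAB_WIDTH]}|")
--         lines.append('')
--     return '\n'.join(lines)
-- ===== Notes on version B (the rewrite author's own statement) =====
-- stated objective: alternative
-- what changed: B replaces A's dense emission (every note appends a cell to all six string accumulators, then an ljust pass) by a sparse representation: one pass records (string, column offset, fret text) placements with a running width, each row is then rebuilt from only its own events by gap-filling dashes between offsets, so no per-note writes to the other five rows and no padding pass.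
import Mathlib
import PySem

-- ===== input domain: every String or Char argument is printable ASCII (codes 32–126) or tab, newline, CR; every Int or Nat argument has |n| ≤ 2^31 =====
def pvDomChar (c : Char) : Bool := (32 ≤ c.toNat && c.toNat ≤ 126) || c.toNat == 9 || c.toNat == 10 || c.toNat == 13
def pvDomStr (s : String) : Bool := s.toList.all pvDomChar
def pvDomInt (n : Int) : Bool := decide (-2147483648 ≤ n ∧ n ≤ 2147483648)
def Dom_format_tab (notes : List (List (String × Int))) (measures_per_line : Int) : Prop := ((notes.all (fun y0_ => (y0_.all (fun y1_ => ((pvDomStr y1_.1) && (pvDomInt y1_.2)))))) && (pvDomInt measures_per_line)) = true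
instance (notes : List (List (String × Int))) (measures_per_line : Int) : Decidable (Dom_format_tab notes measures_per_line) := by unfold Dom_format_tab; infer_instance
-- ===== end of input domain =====

-- B replaces A's dense per-note emission into six string accumulators (plus ljust pass) by a
-- sparse placement list with a running width and a per-row gap-fill (objective: alternative).

-- ===== PORT A =====
def TAB_WIDTH : Int := 60

def STRING_NAMES : List (List Char) := [['e'], ['B'], ['G'], ['D'], ['A'], ['E']]

-- body of A's "for note in notes" loop
def pvAStep (strings : PySem.Dict Int (List Char)) (note : List (String × Int)) :
    PySem.Dict Int (List Char) :=
  let string_num := PySem.Dict.getD (PySem.Dict.mk note) "string" 1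
  let fret_num := PySem.Dict.getD (PySem.Dict.mk note) "fret" 0
  if string_num < 1 ∨ string_num > 6 then strings
  else
    let fret_str := PySem.Int.toChars fret_num
    let pad_len := fret_str.length
    (PySem.List.pyRange 1 7 1).foldl (fun strings s =>
      if s = string_num then
        strings.insert s (PySem.Dict.getD strings s [] ++ fret_str ++ ['-'])
      else
        strings.insert s (PySem.Dict.getD strings s [] ++ List.replicate pad_len '-' ++ ['-']))
      strings

-- A's "while pos < max_len" loop; keys 1..6 are always present in `strings`,
-- so Python's strings[i+1] lookup is total and ported as getD
def pvAWhile (strings : PySem.Dict Int (List Char)) (max_len : Int) (pos : Int)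
    (acc : List (List Char)) : List (List Char) :=
  if pos < max_len then
    let e := min (pos + TAB_WIDTH) max_len
    let acc := (PySem.List.enumerate STRING_NAMES 0).foldl (fun acc p =>
      acc ++ [p.2 ++ ['|'] ++
        PySem.List.slice (PySem.Dict.getD strings (p.1 + 1) []) (some pos) (some e) ++ ['|']]) acc
    let acc := acc ++ [[]]
    pvAWhile strings max_len e acc
  else acc
termination_by (max_len - pos).toNat
decreasing_by simp only [TAB_WIDTH] at *; omega

def format_tab (notes : List (List (String × Int))) (measures_per_line : Int) : String :=
  if notes = [] then "No notes to display."
  else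
    let strings := (PySem.List.pyRange 1 7 1).foldl
      (fun d i => d.insert i ([] : List Char)) PySem.Dict.empty
    let strings := notes.foldl pvAStep strings
    -- max(len(s) for s in strings.values()): the dict always has six entries, so max? is some
    let max_len : Int := (PySem.List.max? (strings.values.map (fun v => (v.length : Int))) id).getD 0
    -- s.ljust(max_len, '-') written exactly as pad-with-replicate (empty pad when already long enough)
    let strings := (PySem.List.pyRange 1 7 1).foldl (fun d s =>
      let v := PySem.Dict.getD d s []
      d.insert s (v ++ List.replicate (max_len.toNat - v.length) '-')) strings
    let result_lines := pvAWhile strings max_len 0 []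
    String.ofList (PySem.Chars.join ['\n'] result_lines)

-- ===== PORT B =====
-- Source B's placement pass: one accepted note appends (string, offset, fret text), width advances
def pvBNoteStep (st : List (Int × Int × List Char) × Int) (note : List (String × Int)) :
    List (Int × Int × List Char) × Int :=
  let s := PySem.Dict.getD (PySem.Dict.mk note) "string" 1
  if 1 ≤ s ∧ s ≤ 6 then
    let f := PySem.Int.toChars (PySem.Dict.getD (PySem.Dict.mk note) "fret" 0)
    (st.1 ++ [(s, st.2, f)], st.2 + (f.length : Int) + 1)
  else st

-- Source B's per-row gap-fill step: dashes from cur to the event's offset, then the fret text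
def pvBRowStep (st : List Char × Int) (e : Int × List Char) : List Char × Int :=
  (st.1 ++ List.replicate (e.1 - st.2).toNat '-' ++ e.2, e.1 + (e.2.length : Int))

def format_tab_alt (notes : List (List (String × Int))) (measures_per_line : Int) : String :=
  if notes = [] then "No notes to display."
  else
    let st := notes.foldl pvBNoteStep ([], 0)
    let placements := st.1
    let width := st.2
    let rows : List (List Char) := (PySem.List.pyRange 1 7 1).map (fun k =>
      let events := (placements.filter (fun p => decide (p.1 = k))).map (fun p => p.2)
      let st2 := events.foldl pvBRowStep (([] : List Char), (0 : Int))
      st2.1 ++ List.replicate (width - st2.2).toNat '-')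
    let out := (PySem.List.pyRange 0 width TAB_WIDTH).foldl (fun out pos =>
      (STRING_NAMES.zip rows).foldl (fun out p =>
        out ++ [p.1 ++ ['|'] ++
          PySem.List.slice p.2 (some pos) (some (pos + TAB_WIDTH)) ++ ['|']]) out
      ++ [[]]) []
    String.ofList (PySem.Chars.join ['\n'] out)

-- ===== PRECONDITION & SPEC =====
def Spec_format_tab (notes : List (List (String × Int))) (measures_per_line : Int) (out : String) : Prop := out = format_tab_alt notes measures_per_line
instance (notes : List (List (String × Int))) (measures_per_line : Int) (out : String) : Decidable (Spec_format_tab notes measures_per_line out) := by unfold Spec_format_tab; infer_instance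

-- ===== CLAIM (what is proved, stated in full; the proofs are below) =====
def Claim_equal_format_tab : Prop := ∀ (notes : List (List (String × Int))) (measures_per_line : Int), Dom_format_tab notes measures_per_line → Spec_format_tab notes measures_per_line (format_tab notes measures_per_line)

-- ===== LEMMAS AND PROOFS =====

-- the cell one note contributes to row k (k = 1..6), [] if the note is filtered out
def pvCell (note : List (String × Int)) (k : Int) : List Char :=
  if 1 ≤ PySem.Dict.getD (PySem.Dict.mk note) "string" 1 ∧
      PySem.Dict.getD (PySem.Dict.mk note) "string" 1 ≤ 6 then
    (if k = PySem.Dict.getD (PySem.Dict.mk note) "string" 1 then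
        PySem.Int.toChars (PySem.Dict.getD (PySem.Dict.mk note) "fret" 0)
      else List.replicate (PySem.Int.toChars (PySem.Dict.getD (PySem.Dict.mk note) "fret" 0)).length '-') ++ ['-']
  else []

def pvRow (k : Int) (notes : List (List (String × Int))) : List Char :=
  notes.flatMap (fun n => pvCell n k)

def pvMk6 (r1 r2 r3 r4 r5 r6 : List Char) : PySem.Dict Int (List Char) :=
  PySem.Dict.mk [(1, r1), (2, r2), (3, r3), (4, r4), (5, r5), (6, r6)]

-- the (string, fret text) tokens of the accepted notes, in order
def pvToks (notes : List (List (String × Int))) : List (Int × List Char) :=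
  notes.filterMap (fun note =>
    let s := PySem.Dict.getD (PySem.Dict.mk note) "string" 1
    if 1 ≤ s ∧ s ≤ 6 then
      some (s, PySem.Int.toChars (PySem.Dict.getD (PySem.Dict.mk note) "fret" 0))
    else none)

def pvTotLen (toks : List (Int × List Char)) : Int :=
  (toks.map (fun p => (p.2.length : Int) + 1)).sum

def pvPlc : List (Int × List Char) → Int → List (Int × Int × List Char)
  | [], _ => []
  | (s, f) :: t, o => (s, o, f) :: pvPlc t (o + f.length + 1)

def pvRowOf (k : Int) (toks : List (Int × List Char)) : List Char :=
  toks.flatMap (fun p => (if p.1 = k then p.2 else List.replicate p.2.length '-') ++ ['-'])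

lemma pvRange16 : PySem.List.pyRange 1 7 1 = [1, 2, 3, 4, 5, 6] := by decide

lemma pvRange_pos_cons {a b s : Int} (h : a < b) (hs : 0 < s) :
    PySem.List.pyRange a b s = a :: PySem.List.pyRange (a + s) b s := by
  rw [PySem.List.pyRange_of_pos _ _ hs, PySem.List.pyRange_of_pos _ _ hs]
  have hkey : ((b - a + s - 1) / s) = (b - (a + s) + s - 1) / s + 1 := by
    have h1 : b - a + s - 1 = (b - (a + s) + s - 1) + 1 * s := by ring
    rw [h1, Int.add_mul_ediv_right _ _ (by omega : s ≠ 0)]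
  by_cases h2 : a + s < b
  · rw [if_pos h, if_pos h2, hkey]
    have hn : ((b - (a + s) + s - 1) / s) ≥ 0 := Int.ediv_nonneg (by omega) (by omega)
    rw [show ((b - (a + s) + s - 1) / s + 1).toNat = ((b - (a + s) + s - 1) / s).toNat + 1 by omega]
    rw [List.range_succ_eq_map]
    simp only [List.map_cons, List.map_map]
    refine List.cons_eq_cons.mpr ⟨by simp, ?_⟩
    apply List.map_congr_left
    intro k _
    simp [Function.comp, Nat.succ_eq_add_one]
    ring
  · rw [if_pos h, if_neg h2]
    have h0 : (b - (a + s) + s - 1) / s = 0 := by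
      apply Int.ediv_eq_zero_of_lt <;> omega
    rw [hkey, h0]
    simp

lemma pvRange_pos_nil {a b s : Int} (h : b ≤ a) (hs : 0 < s) :
    PySem.List.pyRange a b s = [] := by
  rw [PySem.List.pyRange_of_pos _ _ hs, if_neg (by omega)]
  simp

lemma pvAStep_eq (note : List (String × Int)) (r1 r2 r3 r4 r5 r6 : List Char) :
    pvAStep (pvMk6 r1 r2 r3 r4 r5 r6) note =
    pvMk6 (r1 ++ pvCell note 1) (r2 ++ pvCell note 2) (r3 ++ pvCell note 3)
          (r4 ++ pvCell note 4) (r5 ++ pvCell note 5) (r6 ++ pvCell note 6) := by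
  unfold pvAStep pvCell pvMk6
  generalize hsn : PySem.Dict.getD (PySem.Dict.mk note) "string" 1 = sn
  by_cases hacc : 1 ≤ sn ∧ sn ≤ 6
  · rw [if_neg (by omega), pvRange16]
    obtain ⟨hl, hr⟩ := hacc
    interval_cases sn <;>
      simp [PySem.Dict.insert, PySem.Dict.contains, PySem.Dict.getD, PySem.Dict.get?]
  · rw [if_pos (by omega)]
    simp [hacc]

lemma pvAFold (notes : List (List (String × Int))) :
    ∀ r1 r2 r3 r4 r5 r6 : List Char,
    notes.foldl pvAStep (pvMk6 r1 r2 r3 r4 r5 r6) =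
    pvMk6 (r1 ++ pvRow 1 notes) (r2 ++ pvRow 2 notes) (r3 ++ pvRow 3 notes)
          (r4 ++ pvRow 4 notes) (r5 ++ pvRow 5 notes) (r6 ++ pvRow 6 notes) := by
  induction notes with
  | nil => intro r1 r2 r3 r4 r5 r6; simp [pvRow]
  | cons n t ih =>
    intro r1 r2 r3 r4 r5 r6
    simp only [List.foldl_cons, pvAStep_eq, ih, pvRow, List.flatMap_cons, List.append_assoc]

lemma pvSlice_min (xs : List Char) (L : Int) (hL : L = (xs.length : Int)) (pos : Int) (h : 0 ≤ pos) :
    PySem.List.slice xs (some pos) (some (min (pos + 60) L)) =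
    PySem.List.slice xs (some pos) (some (pos + 60)) := by
  subst hL
  rw [PySem.List.slice_toNat xs (a := pos) (b := min (pos + 60) (xs.length : Int)) h (by omega),
    PySem.List.slice_toNat xs (a := pos) (b := pos + 60) h (by omega)]
  by_cases hc : pos + 60 ≤ (xs.length : Int)
  · rw [min_eq_left hc]
  · rw [min_eq_right (by omega : (xs.length : Int) ≤ pos + 60)]
    rw [List.take_of_length_le, List.take_of_length_le] <;> simp [List.length_drop] <;> omega

lemma pvEnum6 : PySem.List.enumerate STRING_NAMES 0 =
    [(0, ['e']), (1, ['B']), (2, ['G']), (3, ['D']), (4, ['A']), (5, ['E'])] := by decide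

lemma pvGetD6_1 (r1 r2 r3 r4 r5 r6 : List Char) : PySem.Dict.getD (pvMk6 r1 r2 r3 r4 r5 r6) 1 [] = r1 := rfl
lemma pvGetD6_2 (r1 r2 r3 r4 r5 r6 : List Char) : PySem.Dict.getD (pvMk6 r1 r2 r3 r4 r5 r6) 2 [] = r2 := rfl
lemma pvGetD6_3 (r1 r2 r3 r4 r5 r6 : List Char) : PySem.Dict.getD (pvMk6 r1 r2 r3 r4 r5 r6) 3 [] = r3 := rfl
lemma pvGetD6_4 (r1 r2 r3 r4 r5 r6 : List Char) : PySem.Dict.getD (pvMk6 r1 r2 r3 r4 r5 r6) 4 [] = r4 := rfl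
lemma pvGetD6_5 (r1 r2 r3 r4 r5 r6 : List Char) : PySem.Dict.getD (pvMk6 r1 r2 r3 r4 r5 r6) 5 [] = r5 := rfl
lemma pvGetD6_6 (r1 r2 r3 r4 r5 r6 : List Char) : PySem.Dict.getD (pvMk6 r1 r2 r3 r4 r5 r6) 6 [] = r6 := rfl

lemma pvWhile_eq (r1 r2 r3 r4 r5 r6 : List Char)
    (h2 : r2.length = r1.length) (h3 : r3.length = r1.length)
    (h4 : r4.length = r1.length) (h5 : r5.length = r1.length)
    (h6 : r6.length = r1.length) :
    ∀ (n : Nat) (pos : Int), ((r1.length : Int) - pos).toNat ≤ n → 0 ≤ pos →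
    ∀ acc : List (List Char),
    pvAWhile (pvMk6 r1 r2 r3 r4 r5 r6) (r1.length : Int) pos acc =
    (PySem.List.pyRange pos (r1.length : Int) TAB_WIDTH).foldl (fun out pos =>
      (STRING_NAMES.zip [r1, r2, r3, r4, r5, r6]).foldl (fun out p =>
        out ++ [p.1 ++ ['|'] ++
          PySem.List.slice p.2 (some pos) (some (pos + TAB_WIDTH)) ++ ['|']]) out
      ++ [[]]) acc := by
  intro n
  induction n with
  | zero =>
    intro pos hn h0 acc
    rw [pvAWhile, if_neg (by omega), pvRange_pos_nil (by omega) (by norm_num [TAB_WIDTH]),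
      List.foldl_nil]
  | succ n ihn =>
    intro pos hn h0 acc
    by_cases hlt : pos < (r1.length : Int)
    · rw [pvAWhile, if_pos hlt]
      simp only [TAB_WIDTH] at ihn ⊢
      rw [ihn (min (pos + 60) ((r1.length : Int))) (by omega) (by omega)]
      rw [pvRange_pos_cons hlt (by norm_num), List.foldl_cons]
      have hrange : PySem.List.pyRange (min (pos + 60) ((r1.length : Int))) ((r1.length : Int)) 60 =
          PySem.List.pyRange (pos + 60) ((r1.length : Int)) 60 := by
        by_cases hend : pos + 60 ≤ (r1.length : Int)
        · rw [min_eq_left hend]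
        · rw [min_eq_right (by omega), pvRange_pos_nil (by omega) (by norm_num),
            pvRange_pos_nil (by omega) (by norm_num)]
      rw [hrange]
      congr 1
      simp only [pvEnum6, STRING_NAMES, List.zip, List.zipWith, List.foldl_cons, List.foldl_nil]
      norm_num [pvGetD6_1, pvGetD6_2, pvGetD6_3, pvGetD6_4, pvGetD6_5, pvGetD6_6]
      rw [pvSlice_min r1 _ rfl pos h0, pvSlice_min r2 _ (by rw [h2]) pos h0,
        pvSlice_min r3 _ (by rw [h3]) pos h0, pvSlice_min r4 _ (by rw [h4]) pos h0,
        pvSlice_min r5 _ (by rw [h5]) pos h0, pvSlice_min r6 _ (by rw [h6]) pos h0]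
      simp
    · rw [pvAWhile, if_neg hlt, pvRange_pos_nil (by omega) (by norm_num [TAB_WIDTH]),
        List.foldl_nil]

lemma pvCell_len (note : List (String × Int)) (k : Int) :
    (pvCell note k).length = (pvCell note 1).length := by
  unfold pvCell
  split_ifs <;> simp

lemma pvRow_len (notes : List (List (String × Int))) (k : Int) :
    (pvRow k notes).length = (pvRow 1 notes).length := by
  induction notes with
  | nil => rfl
  | cons n t ih => simp [pvRow, List.flatMap_cons, pvCell_len n k] at *; omega

lemma pvInit6 : (PySem.List.pyRange 1 7 1).foldl
    (fun d i => d.insert i ([] : List Char)) PySem.Dict.empty = pvMk6 [] [] [] [] [] [] := by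
  decide

lemma pvValues6 (r1 r2 r3 r4 r5 r6 : List Char) :
    (pvMk6 r1 r2 r3 r4 r5 r6).values = [r1, r2, r3, r4, r5, r6] := rfl

lemma pvMax6 (L : Int) : PySem.List.max? [L, L, L, L, L, L] id = some L := by
  simp [PySem.List.max?]

lemma pvLjust (m : Nat) (r1 r2 r3 r4 r5 r6 : List Char) :
    ([1, 2, 3, 4, 5, 6] : List Int).foldl (fun d s =>
      d.insert s (PySem.Dict.getD d s [] ++
        List.replicate (m - (PySem.Dict.getD d s []).length) '-')) (pvMk6 r1 r2 r3 r4 r5 r6) =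
    pvMk6 (r1 ++ List.replicate (m - r1.length) '-')
          (r2 ++ List.replicate (m - r2.length) '-')
          (r3 ++ List.replicate (m - r3.length) '-')
          (r4 ++ List.replicate (m - r4.length) '-')
          (r5 ++ List.replicate (m - r5.length) '-')
          (r6 ++ List.replicate (m - r6.length) '-') := by
  unfold pvMk6
  simp [PySem.Dict.insert, PySem.Dict.contains, PySem.Dict.getD, PySem.Dict.get?]

-- B's placement fold builds exactly the prefix-sum placements of the accepted tokens
lemma pvBFold1 (notes : List (List (String × Int))) :
    ∀ (acc : List (Int × Int × List Char)) (o : Int),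
    notes.foldl pvBNoteStep (acc, o) =
    (acc ++ pvPlc (pvToks notes) o, o + pvTotLen (pvToks notes)) := by
  induction notes with
  | nil => intro acc o; simp [pvToks, pvPlc, pvTotLen]
  | cons n t ih =>
    intro acc o
    simp only [List.foldl_cons, pvBNoteStep, pvToks, List.filterMap_cons]
    by_cases hp : 1 ≤ PySem.Dict.getD (PySem.Dict.mk n) "string" 1 ∧
        PySem.Dict.getD (PySem.Dict.mk n) "string" 1 ≤ 6
    · simp only [hp, ih]
      simp only [pvToks] at ih ⊢
      simp [pvPlc, pvTotLen]
      ring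
    · simp only [hp, ih]
      simp [pvToks]

-- the gap-fill over row k's events reconstructs the dense row of the token list
lemma pvGap (k : Int) (toks : List (Int × List Char)) :
    ∀ (o cur : Int) (parts : List Char), cur ≤ o →
    (let st2 := (((pvPlc toks o).filter (fun p => decide (p.1 = k))).map
        (fun p => p.2)).foldl pvBRowStep (parts, cur)
     st2.1 ++ List.replicate (o + pvTotLen toks - st2.2).toNat '-')
    = parts ++ List.replicate (o - cur).toNat '-' ++ pvRowOf k toks := by
  induction toks with
  | nil =>
    intro o cur parts h
    simp [pvPlc, pvTotLen, pvRowOf]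
  | cons p t ih =>
    intro o cur parts h
    obtain ⟨s, f⟩ := p
    by_cases hk : s = k
    · simp only [pvPlc, List.filter_cons, hk, decide_true, if_pos, List.map_cons,
        List.foldl_cons]
      show (let st2 := ((pvPlc t (o + ↑f.length + 1)).filter (fun p => decide (p.1 = k))
          |>.map (fun p => p.2)).foldl pvBRowStep (pvBRowStep (parts, cur) (o, f));
        st2.1 ++ List.replicate (o + pvTotLen ((k, f) :: t) - st2.2).toNat '-') = _
      have hTot : o + pvTotLen ((k, f) :: t) =
          (o + (f.length : Int) + 1) + pvTotLen t := by
        simp [pvTotLen]; ring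
      simp only [pvBRowStep, hTot]
      have := ih (o + (f.length : Int) + 1) (o + (f.length : Int))
        (parts ++ List.replicate (o - cur).toNat '-' ++ f) (by omega)
      simp only [] at this ⊢
      rw [this]
      have h1 : (o + (f.length : Int) + 1 - (o + (f.length : Int))).toNat = 1 := by omega
      simp only [h1, pvRowOf, List.flatMap_cons, hk, if_pos rfl]
      simp [pvRowOf]
    · simp only [pvPlc, List.filter_cons, hk, decide_false, if_neg, List.foldl_cons]
      rw [if_neg (by simpa using hk)]
      have hTot : o + pvTotLen ((s, f) :: t) =
          (o + (f.length : Int) + 1) + pvTotLen t := by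
        simp [pvTotLen]; ring
      simp only [hTot]
      have := ih (o + (f.length : Int) + 1) cur parts (by omega)
      simp only [] at this ⊢
      rw [this]
      have h1 : (o + (f.length : Int) + 1 - cur).toNat
          = (o - cur).toNat + f.length + 1 := by omega
      rw [h1, List.replicate_add, List.replicate_add]
      simp only [pvRowOf, List.flatMap_cons, if_neg hk, List.replicate_one, List.append_assoc,
        List.singleton_append, List.cons_append, List.nil_append]

lemma pvRow_eq_rowOf (k : Int) (notes : List (List (String × Int))) :
    pvRow k notes = pvRowOf k (pvToks notes) := by
  induction notes with
  | nil => rfl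
  | cons n t ih =>
    simp only [pvRow, pvToks, List.flatMap_cons, List.filterMap_cons] at *
    by_cases hp : 1 ≤ PySem.Dict.getD (PySem.Dict.mk n) "string" 1 ∧
        PySem.Dict.getD (PySem.Dict.mk n) "string" 1 ≤ 6
    · simp only [if_pos hp, pvRowOf, List.flatMap_cons]
      rw [show pvCell n k =
          (if PySem.Dict.getD (PySem.Dict.mk n) "string" 1 = k then
              PySem.Int.toChars (PySem.Dict.getD (PySem.Dict.mk n) "fret" 0)
            else List.replicate (PySem.Int.toChars (PySem.Dict.getD (PySem.Dict.mk n) "fret" 0)).length '-') ++ ['-']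
        from by unfold pvCell; rw [if_pos hp]; by_cases h : k = PySem.Dict.getD (PySem.Dict.mk n) "string" 1 <;> simp [h, eq_comm] ]
      rw [ih]
      rfl
    · simp only [if_neg hp]
      have : pvCell n k = [] := by unfold pvCell; rw [if_neg hp]
      rw [this, List.nil_append, ih]

lemma pvRowOf_len (k : Int) (toks : List (Int × List Char)) :
    ((pvRowOf k toks).length : Int) = pvTotLen toks := by
  induction toks with
  | nil => rfl
  | cons p t ih =>
    simp only [pvRowOf, pvTotLen, List.flatMap_cons, List.map_cons, List.sum_cons,
      List.length_append] at *
    push_cast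
    rw [ih]
    split_ifs <;> simp <;> ring

-- ===== VERDICT (by name: the statement is the Claim_ definition above) =====
theorem format_tab_spec : Claim_equal_format_tab := by
  unfold Claim_equal_format_tab Spec_format_tab
  intro notes m _
  unfold format_tab format_tab_alt
  by_cases hnil : notes = []
  · rw [if_pos hnil, if_pos hnil]
  · rw [if_neg hnil, if_neg hnil]
    simp only []
    rw [pvInit6, pvAFold, pvBFold1 notes [] 0, List.nil_append]
    simp only [List.nil_append, zero_add, pvRange16, List.map_cons, List.map_nil]
    have hrow : ∀ k : Int,
        (let st2 := (((pvPlc (pvToks notes) 0).filter (fun p => decide (p.1 = k))).map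
            (fun p => p.2)).foldl pvBRowStep (([] : List Char), (0 : Int))
         st2.1 ++ List.replicate (pvTotLen (pvToks notes) - st2.2).toNat '-')
        = pvRow k notes := by
      intro k
      have := pvGap k (pvToks notes) 0 0 [] (le_refl 0)
      simp only [zero_add, Int.sub_zero] at this ⊢
      rw [this]
      simp [pvRow_eq_rowOf]
    simp only [hrow]
    rw [pvValues6]
    simp only [List.map_cons, List.map_nil,
      pvRow_len notes 2, pvRow_len notes 3, pvRow_len notes 4, pvRow_len notes 5,
      pvRow_len notes 6, pvMax6, Option.getD_some, pvLjust]
    simp only [Int.toNat_natCast, Nat.sub_self, List.replicate_zero, List.append_nil]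
    have hw : pvTotLen (pvToks notes) = ((pvRow 1 notes).length : Int) := by
      rw [pvRow_eq_rowOf, pvRowOf_len]
    rw [hw]
    rw [pvWhile_eq (pvRow 1 notes) (pvRow 2 notes) (pvRow 3 notes) (pvRow 4 notes)
      (pvRow 5 notes) (pvRow 6 notes)
      (pvRow_len notes 2) (pvRow_len notes 3) (pvRow_len notes 4) (pvRow_len notes 5)
      (pvRow_len notes 6) (((pvRow 1 notes).length : Int) - 0).toNat 0 (le_refl _) (le_refl 0)]
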